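-- pv_equiv track=rewrite | github.com/paulovic96/Burst_Clustering | asymmetric_laplacian_distribution.py | get_index_per_class
-- ===== SOURCE A (Python) =====
-- def get_index_per_class(amplitude_conditions,time_constant_conditions, ambiguous_conditions, samples_per_condition, samples_for_ambiguous):
--     """
--     Args:
--         amplitude_conditions (list): list of strings indicating the height of the amplitude
--         time_constant_conditions (list): list of strings indicating the relationship between the two time constants
--         ambiguous_conditions (list): list of strings with conditions supposed to be ambiguous
--         samples_per_condition (int): number of functions generated per condition
--         samples_for_ambiguous (int): number of functions generated per ambiguous condition
--
--     Returns:
--         class_dict (dict): Dictionary containing start and end point of each condition relative to data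
--                            key (string) = Condition (combination of amplitude and time condition)
--                            value (tuple) = (Start, End)
--     """
--     class_dict = {}
--     current_index = 0
--     for amplitude_condition in amplitude_conditions:
--         for time_constant_condition in time_constant_conditions:
--             condition = amplitude_condition + "-" + time_constant_condition
--             if amplitude_condition in ambiguous_conditions or time_constant_condition in ambiguous_conditions:
--                 class_dict[condition] = [current_index, current_index + samples_for_ambiguous-1]
--                 current_index += samples_for_ambiguous
--             else:
--                 class_dict[condition] = [current_index, current_index + samples_per_condition-1]
--                 current_index += samples_per_condition
--     return class_dict
-- ===== SOURCE B (Python) =====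
-- def get_index_per_class(amplitude_conditions, time_constant_conditions, ambiguous_conditions, samples_per_condition, samples_for_ambiguous):
--     # pass 1: ordered table of (condition, block size) in the nested iteration order
--     entries = [(a + "-" + t,
--                 samples_for_ambiguous if (a in ambiguous_conditions or t in ambiguous_conditions)
--                 else samples_per_condition)
--                for a in amplitude_conditions for t in time_constant_conditions]
--     # pass 2: prefix-sum start offsets over the sizes
--     starts = [0]
--     for _, size in entries:
--         starts.append(starts[-1] + size)
--     # pass 3: assemble the dict from the table and the offsets
--     return {cond: [start, start + size - 1]
--             for (cond, size), start in zip(entries, starts)}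
-- ===== Notes on version B (the rewrite author's own statement) =====
-- stated objective: alternative
-- what changed: Replaces A's single loop threading a running index through the dict with three distinct passes: build an ordered (condition, size) table, compute prefix-sum start offsets over the sizes, then assemble the dict by zipping the table with the offsets.
import Mathlib
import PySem

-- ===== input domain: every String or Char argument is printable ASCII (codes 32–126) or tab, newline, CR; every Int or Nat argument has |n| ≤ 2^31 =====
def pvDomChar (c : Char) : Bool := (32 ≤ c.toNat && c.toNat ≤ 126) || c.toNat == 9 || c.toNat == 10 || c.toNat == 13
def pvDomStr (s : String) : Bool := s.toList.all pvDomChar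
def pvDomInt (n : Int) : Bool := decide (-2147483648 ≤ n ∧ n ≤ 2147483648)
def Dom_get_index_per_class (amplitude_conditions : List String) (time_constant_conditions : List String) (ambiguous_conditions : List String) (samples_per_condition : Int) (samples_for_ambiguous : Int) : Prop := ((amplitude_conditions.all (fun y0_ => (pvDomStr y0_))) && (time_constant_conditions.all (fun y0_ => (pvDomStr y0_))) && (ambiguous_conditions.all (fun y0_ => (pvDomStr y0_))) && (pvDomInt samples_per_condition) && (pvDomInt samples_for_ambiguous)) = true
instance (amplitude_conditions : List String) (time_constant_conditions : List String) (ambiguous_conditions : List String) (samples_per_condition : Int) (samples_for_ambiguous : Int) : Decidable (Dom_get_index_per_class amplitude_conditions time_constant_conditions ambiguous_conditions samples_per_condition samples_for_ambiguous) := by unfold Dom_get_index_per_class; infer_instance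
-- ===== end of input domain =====

-- ===== PORT A =====
-- B replaces A's threaded running index with a size table + prefix-sum offsets (alternative decomposition, same cost).
def get_index_per_class (amplitude_conditions : List String) (time_constant_conditions : List String) (ambiguous_conditions : List String) (samples_per_condition : Int) (samples_for_ambiguous : Int) : List (String × List Int) :=
  (amplitude_conditions.foldl
    (fun (st : PySem.Dict String (List Int) × Int) amplitude_condition =>
      time_constant_conditions.foldl
        (fun (st : PySem.Dict String (List Int) × Int) time_constant_condition =>
          let condition := amplitude_condition ++ "-" ++ time_constant_condition
          if amplitude_condition ∈ ambiguous_conditions ∨ time_constant_condition ∈ ambiguous_conditions then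
            (st.1.insert condition [st.2, st.2 + samples_for_ambiguous - 1], st.2 + samples_for_ambiguous)
          else
            (st.1.insert condition [st.2, st.2 + samples_per_condition - 1], st.2 + samples_per_condition))
        st)
    (PySem.Dict.empty, (0 : Int))).1.items

-- ===== PORT B =====
-- pass 1 of Source B: the ordered (condition, size) table
def pvEntries (amplitude_conditions : List String) (time_constant_conditions : List String) (ambiguous_conditions : List String) (samples_per_condition : Int) (samples_for_ambiguous : Int) : List (String × Int) :=
  amplitude_conditions.flatMap (fun a =>
    time_constant_conditions.map (fun t =>
      (a ++ "-" ++ t,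
       if a ∈ ambiguous_conditions ∨ t ∈ ambiguous_conditions then samples_for_ambiguous
       else samples_per_condition)))

-- pass 2 of Source B: prefix sums (starts = [0]; for size: starts.append(starts[-1]+size))
def pvStarts (sizes : List Int) : List Int := sizes.scanl (· + ·) 0

def get_index_per_class_alt (amplitude_conditions : List String) (time_constant_conditions : List String) (ambiguous_conditions : List String) (samples_per_condition : Int) (samples_for_ambiguous : Int) : List (String × List Int) :=
  let entries := pvEntries amplitude_conditions time_constant_conditions ambiguous_conditions samples_per_condition samples_for_ambiguous
  let starts := pvStarts (entries.map Prod.snd)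
  ((entries.zip starts).foldl
    (fun (d : PySem.Dict String (List Int)) p => d.insert p.1.1 [p.2, p.2 + p.1.2 - 1])
    PySem.Dict.empty).items

-- ===== PRECONDITION & SPEC =====
def Spec_get_index_per_class (amplitude_conditions : List String) (time_constant_conditions : List String) (ambiguous_conditions : List String) (samples_per_condition : Int) (samples_for_ambiguous : Int) (out : List (String × List Int)) : Prop := out = get_index_per_class_alt amplitude_conditions time_constant_conditions ambiguous_conditions samples_per_condition samples_for_ambiguous
instance (amplitude_conditions : List String) (time_constant_conditions : List String) (ambiguous_conditions : List String) (samples_per_condition : Int) (samples_for_ambiguous : Int) (out : List (String × List Int)) : Decidable (Spec_get_index_per_class amplitude_conditions time_constant_conditions ambiguous_conditions samples_per_condition samples_for_ambiguous out) := by unfold Spec_get_index_per_class; infer_instance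

-- ===== CLAIM (what is proved, stated in full; the proofs are below) =====
def Claim_equal_get_index_per_class : Prop := ∀ (amplitude_conditions : List String) (time_constant_conditions : List String) (ambiguous_conditions : List String) (samples_per_condition : Int) (samples_for_ambiguous : Int), Dom_get_index_per_class amplitude_conditions time_constant_conditions ambiguous_conditions samples_per_condition samples_for_ambiguous → Spec_get_index_per_class amplitude_conditions time_constant_conditions ambiguous_conditions samples_per_condition samples_for_ambiguous (get_index_per_class amplitude_conditions time_constant_conditions ambiguous_conditions samples_per_condition samples_for_ambiguous)

-- ===== LEMMAS AND PROOFS =====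

-- folding over a flatMap is the nested fold
theorem pv_foldl_flatMap {α β σ : Type} (l : List α) (f : α → List β) (g : σ → β → σ) (init : σ) :
    (l.flatMap f).foldl g init = l.foldl (fun s a => (f a).foldl g s) init := by
  induction l generalizing init with
  | nil => rfl
  | cons a l ih => simp [List.flatMap_cons, List.foldl_append, ih]

-- the threaded (dict, index) fold equals the zip-with-prefix-sums fold
theorem pv_thread_eq_zip (l : List (String × Int)) (d : PySem.Dict String (List Int)) (i : Int) :
    (l.foldl (fun (st : PySem.Dict String (List Int) × Int) e =>
        (st.1.insert e.1 [st.2, st.2 + e.2 - 1], st.2 + e.2)) (d, i)).1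
    = ((l.zip ((l.map Prod.snd).scanl (· + ·) i)).foldl
        (fun (d : PySem.Dict String (List Int)) p => d.insert p.1.1 [p.2, p.2 + p.1.2 - 1]) d) := by
  induction l generalizing d i with
  | nil => rfl
  | cons e l ih =>
      simp only [List.foldl_cons, List.map_cons, List.scanl_cons, List.zip_cons_cons]
      exact ih _ _

theorem pv_foldl_ext {α σ : Type} (f g : σ → α → σ) (h : ∀ s a, f s a = g s a) (l : List α) (s : σ) :
    l.foldl f s = l.foldl g s := by
  have hfg : f = g := funext fun s => funext (h s)
  rw [hfg]

theorem get_index_per_class_eq (amplitude_conditions : List String) (time_constant_conditions : List String) (ambiguous_conditions : List String) (samples_per_condition : Int) (samples_for_ambiguous : Int) :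
    get_index_per_class amplitude_conditions time_constant_conditions ambiguous_conditions samples_per_condition samples_for_ambiguous
    = get_index_per_class_alt amplitude_conditions time_constant_conditions ambiguous_conditions samples_per_condition samples_for_ambiguous := by
  simp only [get_index_per_class, get_index_per_class_alt, pvEntries, pvStarts]
  rw [← pv_thread_eq_zip, pv_foldl_flatMap]
  congr 1
  congr 1
  apply pv_foldl_ext
  intro st a
  rw [List.foldl_map]
  apply pv_foldl_ext
  intro st' t
  dsimp only
  by_cases h : a ∈ ambiguous_conditions ∨ t ∈ ambiguous_conditions
  · simp [h]
  · simp [h]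

-- ===== VERDICT (by name: the statement is the Claim_ definition above) =====
theorem get_index_per_class_spec : Claim_equal_get_index_per_class := by
  intro ac tc amb spc sfa _
  exact get_index_per_class_eq ac tc amb spc sfa
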